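-- pv_equiv track=rewrite | github.com/aglabx/edusummer2021 | students/Abusagit/basic_algo/sequence_type.py | seq_type
-- ===== SOURCE A (Python) =====
-- def seq_type(sequence):
--     if len(set(sequence)) <= 1:
--         return "CONSTANT"
--
--     ascending = True
--     descending = True
--     weakness = False
--
--     previous = sequence[0]
--     for i in range(1, len(sequence)):
--         weakness |= sequence[i] == previous
--         ascending &= sequence[i] >= previous
--         descending &= sequence[i] <= previous
--         previous = sequence[i]
--
--     if ascending:
--         return "WEAKLY ASCENDING" if weakness else "ASCENDING"
--     if descending:
--         return "WEAKLY DESCENDING" if weakness else "DESCENDING"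
--     return "RANDOM"
-- ===== SOURCE B (Python) =====
-- def seq_type(sequence):
--     if len(set(sequence)) <= 1:
--         return "CONSTANT"
--     seq = list(sequence)
--     has_dup = len(set(seq)) < len(seq)
--     if seq == sorted(seq):
--         return "WEAKLY ASCENDING" if has_dup else "ASCENDING"
--     if seq == sorted(seq, reverse=True):
--         return "WEAKLY DESCENDING" if has_dup else "DESCENDING"
--     return "RANDOM"
-- ===== Notes on version B (the rewrite author's own statement) =====
-- stated objective: simpler
-- what changed: Replaced the single-pass three-flag scan (ascending/descending/weakness with a running previous element) by a sort-and-compare test: the list is monotone iff it equals its sorted (or reverse-sorted) copy, and the weakness flag is recovered as the presence of any duplicate.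
import Mathlib
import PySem

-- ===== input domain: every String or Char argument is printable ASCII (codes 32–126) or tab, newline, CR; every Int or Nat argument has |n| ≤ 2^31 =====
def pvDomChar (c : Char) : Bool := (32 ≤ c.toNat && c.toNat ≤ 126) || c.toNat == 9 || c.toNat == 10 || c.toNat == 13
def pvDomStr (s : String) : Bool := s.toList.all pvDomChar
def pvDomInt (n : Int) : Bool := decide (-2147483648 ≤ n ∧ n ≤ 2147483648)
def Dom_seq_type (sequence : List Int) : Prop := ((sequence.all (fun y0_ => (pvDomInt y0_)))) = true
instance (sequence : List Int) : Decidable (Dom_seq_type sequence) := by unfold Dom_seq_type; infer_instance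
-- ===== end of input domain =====

-- B replaces A's single-pass three-flag scan by a sort-and-compare monotonicity test; same results, proved equal.

-- ===== PORT A =====
-- the for-loop of A: state (weakness, ascending, descending, previous), one step per element
def seqLoop : Bool → Bool → Bool → Int → List Int → Bool × Bool × Bool
  | w, a, d, _, [] => (w, a, d)
  | w, a, d, prev, y :: ys =>
      seqLoop (w || decide (y = prev)) (a && decide (prev ≤ y)) (d && decide (y ≤ prev)) y ys

def seq_type (sequence : List Int) : String :=
  if (PySem.Set.ofList sequence).length ≤ 1 then "CONSTANT"
  else
    match sequence with
    | [] => "CONSTANT"   -- unreachable: the empty list is caught by the guard above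
    | x :: rest =>
      match seqLoop false true true x rest with
      | (weakness, ascending, descending) =>
        if ascending then (if weakness then "WEAKLY ASCENDING" else "ASCENDING")
        else if descending then (if weakness then "WEAKLY DESCENDING" else "DESCENDING")
        else "RANDOM"

-- ===== PORT B =====
def seq_type_alt (sequence : List Int) : String :=
  if (PySem.Set.ofList sequence).length ≤ 1 then "CONSTANT"
  else
    let hasDup := decide ((PySem.Set.ofList sequence).length < sequence.length)
    if sequence = PySem.List.sorted sequence (fun z => z) false then
      if hasDup then "WEAKLY ASCENDING" else "ASCENDING"
    else if sequence = PySem.List.sorted sequence (fun z => z) true then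
      if hasDup then "WEAKLY DESCENDING" else "DESCENDING"
    else "RANDOM"

-- ===== PRECONDITION & SPEC =====
def Spec_seq_type (sequence : List Int) (out : String) : Prop := out = seq_type_alt sequence
instance (sequence : List Int) (out : String) : Decidable (Spec_seq_type sequence out) := by unfold Spec_seq_type; infer_instance

-- ===== CLAIM (what is proved, stated in full; the proofs are below) =====
def Claim_equal_seq_type : Prop := ∀ (sequence : List Int), Dom_seq_type sequence → Spec_seq_type sequence (seq_type sequence)

-- ===== LEMMAS AND PROOFS =====

lemma isChain_and {α : Type} {R S : α → α → Prop} :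
    ∀ (l : List α), l.IsChain R → l.IsChain S → l.IsChain (fun a b => R a b ∧ S a b)
  | [], _, _ => List.isChain_nil
  | [a], _, _ => List.isChain_singleton a
  | a :: b :: t, hR, hS => by
      rw [List.isChain_cons_cons] at *
      exact ⟨⟨hR.1, hS.1⟩, isChain_and (b :: t) hR.2 hS.2⟩

-- len(set(l)) < len(l)  ↔  l has a duplicate
lemma ofList_length_lt_iff (l : List Int) :
    (PySem.Set.ofList l).length < l.length ↔ ¬ l.Nodup := by
  have hmem : ∀ x, x ∈ PySem.Set.ofList l ↔ x ∈ l.dedup := by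
    intro x; rw [PySem.Set.mem_ofList, List.mem_dedup]
  have hperm : (PySem.Set.ofList l).Perm l.dedup :=
    (List.perm_ext_iff_of_nodup (PySem.Set.nodup_ofList l) l.nodup_dedup).mpr hmem
  have hlen : (PySem.Set.ofList l).length = l.dedup.length := hperm.length_eq
  have hle : l.dedup.length ≤ l.length := l.dedup_sublist.length_le
  rw [hlen]
  constructor
  · intro hlt hnd
    rw [List.dedup_eq_self.mpr hnd] at hlt
    omega
  · intro hnd
    rcases lt_or_eq_of_le hle with h | h
    · exact h
    · exact absurd (l.dedup_sublist.eq_of_length h ▸ l.nodup_dedup) hnd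

-- in a monotone list, no adjacent duplicate ↔ no duplicate at all
lemma chain_ne_iff_nodup_asc (l : List Int) (h : l.IsChain (· ≤ ·)) :
    l.IsChain (· ≠ ·) ↔ l.Nodup := by
  constructor
  · intro hne
    have hlt : l.IsChain (· < ·) :=
      (isChain_and l h hne).imp (by intro a b hab; exact lt_of_le_of_ne hab.1 hab.2)
    exact (List.isChain_iff_pairwise.mp hlt).imp ne_of_lt
  · intro hnd
    exact hnd.isChain

lemma chain_ne_iff_nodup_desc (l : List Int) (h : l.IsChain (· ≥ ·)) :
    l.IsChain (· ≠ ·) ↔ l.Nodup := by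
  constructor
  · intro hne
    have hlt : l.IsChain (· > ·) :=
      (isChain_and l h hne).imp (by intro a b hab; exact lt_of_le_of_ne hab.1 hab.2.symm)
    exact (List.isChain_iff_pairwise.mp hlt).imp ne_of_gt
  · intro hnd
    exact hnd.isChain

lemma seqLoop_spec (l : List Int) : ∀ (p : Int) (w a d : Bool),
    seqLoop w a d p l =
      (w || !decide (List.IsChain (· ≠ ·) (p :: l)),
       a && decide (List.IsChain (· ≤ ·) (p :: l)),
       d && decide (List.IsChain (· ≥ ·) (p :: l))) := by
  induction l with
  | nil =>
    intro p w a d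
    simp [seqLoop]
  | cons y ys ih =>
    intro p w a d
    simp only [seqLoop, ih, List.isChain_cons_cons, Bool.decide_and, ge_iff_le,
      Bool.not_and, Prod.mk.injEq]
    refine ⟨?_, by rw [Bool.and_assoc], by rw [Bool.and_assoc]⟩
    simp [decide_not, eq_comm, Bool.or_assoc]

-- ===== VERDICT (by name: the statement is the Claim_ definition above) =====
theorem seq_type_spec : Claim_equal_seq_type := by
  intro l _
  unfold Spec_seq_type
  by_cases hg : (PySem.Set.ofList l).length ≤ 1
  · simp [seq_type, seq_type_alt, hg]
  · obtain ⟨x, rest, rfl⟩ : ∃ x rest, l = x :: rest := by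
      cases l with
      | nil => exact absurd (by decide) hg
      | cons x rest => exact ⟨x, rest, rfl⟩
    simp only [seq_type, seq_type_alt, if_neg hg, seqLoop_spec, Bool.false_or, Bool.true_and]
    by_cases hasc : List.IsChain (· ≤ ·) (x :: rest)
    · have hpw : (x :: rest).Pairwise (· ≤ ·) := List.isChain_iff_pairwise.mp hasc
      have hs : PySem.List.sorted (x :: rest) (fun z => z) false = x :: rest :=
        PySem.List.sorted_eq_self_of_pairwise (x :: rest) (fun z => z) hpw
      simp [hasc, hs]
      simp only [chain_ne_iff_nodup_asc _ hasc]
      have hiff : (List.length (PySem.Set.ofList (x :: rest)) ≤ rest.length) ↔ ¬ (x :: rest).Nodup := by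
        rw [← ofList_length_lt_iff, List.length_cons]
        omega
      by_cases hnd : (x :: rest).Nodup <;> simp [hnd, hiff]
    · have hne : ¬ (x :: rest = PySem.List.sorted (x :: rest) (fun z => z) false) := by
        intro h
        have hpw2 := PySem.List.sorted_pairwise (x :: rest) (fun z => z)
        rw [← h] at hpw2
        exact hasc (List.isChain_iff_pairwise.mpr hpw2)
      by_cases hdesc : List.IsChain (· ≥ ·) (x :: rest)
      · have hpw : (x :: rest).Pairwise (fun a b => b ≤ a) :=
          (List.isChain_iff_pairwise.mp hdesc).imp (fun h => h)
        have hs : PySem.List.sorted (x :: rest) (fun z => z) true = x :: rest :=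
          PySem.List.sorted_rev_eq_self_of_pairwise (x :: rest) (fun z => z) hpw
        simp [hasc, hdesc, hne, hs]
        simp only [chain_ne_iff_nodup_desc _ hdesc]
        have hiff : (List.length (PySem.Set.ofList (x :: rest)) ≤ rest.length) ↔ ¬ (x :: rest).Nodup := by
          rw [← ofList_length_lt_iff, List.length_cons]
          omega
        by_cases hnd : (x :: rest).Nodup <;> simp [hnd, hiff]
      · have hne2 : ¬ (x :: rest = PySem.List.sorted (x :: rest) (fun z => z) true) := by
          intro h
          have hpw2 := PySem.List.sorted_pairwise_rev (x :: rest) (fun z => z)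
          rw [← h] at hpw2
          exact hdesc (List.isChain_iff_pairwise.mpr (hpw2.imp (fun h => h)))
        simp [hasc, hdesc, hne, hne2]
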